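-- pv_equiv track=rewrite | github.com/mihyeon1234/algorithm | 스터디(같이 푸는 문제)/0914/2116. 주사위 쌓기.호선. 메모리 31860KB 560ms/백준 2116 주사위 쌓기.py | angry
-- ===== SOURCE A (Python) =====
-- def angry(up_dice, number):
--     idx = 0
--     for k in range(6):
--         if number == up_dice[k]:
--             idx = k
--             break
--
--     if idx == 0:
--         return (max(up_dice[1], up_dice[2], up_dice[3], up_dice[4]), up_dice[5])
--     elif idx == 5:
--         return (max(up_dice[1], up_dice[2], up_dice[3], up_dice[4]), up_dice[0])
--     elif idx == 1:
--         return (max(up_dice[0], up_dice[2], up_dice[5], up_dice[4]), up_dice[3])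
--     elif idx == 3:
--         return (max(up_dice[0], up_dice[2], up_dice[5], up_dice[4]), up_dice[1])
--     elif idx == 2:
--         return (max(up_dice[0], up_dice[1], up_dice[5], up_dice[3]), up_dice[4])
--     elif idx == 4:
--         return (max(up_dice[0], up_dice[1], up_dice[5], up_dice[3]), up_dice[2])
-- ===== SOURCE B (Python) =====
-- def angry(up_dice, number):
--     top = 0
--     for k in range(6):
--         if number == up_dice[k]:
--             top = k
--             break
--     bottom = 5 - top if top % 5 == 0 else (top + 1) % 4 + 1
--     for k, v in sorted(((k, up_dice[k]) for k in range(6)), key=lambda p: p[1], reverse=True):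
--         if k != top and k != bottom:
--             return (v, up_dice[bottom])
-- ===== Notes on version B (the rewrite author's own statement) =====
-- stated objective: alternative
-- what changed: Instead of A's six hard-coded elif branches each taking a max of four named faces, B computes the bottom face by an arithmetic opposite-face formula and selects the best side face by sorting the (index,value) pairs by value descending and returning the first pair whose index is neither top nor bottom (sort-then-scan selection).
import Mathlib
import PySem

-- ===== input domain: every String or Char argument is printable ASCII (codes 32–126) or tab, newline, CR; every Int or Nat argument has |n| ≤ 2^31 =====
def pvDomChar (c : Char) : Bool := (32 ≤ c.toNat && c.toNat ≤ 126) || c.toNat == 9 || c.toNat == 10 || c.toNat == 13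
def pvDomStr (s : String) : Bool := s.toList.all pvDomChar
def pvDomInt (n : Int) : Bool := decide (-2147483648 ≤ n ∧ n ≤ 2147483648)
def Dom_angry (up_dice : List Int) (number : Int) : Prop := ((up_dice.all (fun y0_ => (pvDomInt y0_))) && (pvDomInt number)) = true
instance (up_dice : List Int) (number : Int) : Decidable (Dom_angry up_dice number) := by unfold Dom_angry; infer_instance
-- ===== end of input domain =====

-- B replaces A's six hard-coded branches by an arithmetic opposite-face formula and a
-- sort-then-scan selection of the best side face (objective: alternative).

-- ===== PORT A =====
-- the 'for k in range(6): if number == up_dice[k]: idx = k; break' loop (idx defaults to 0)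
def angryScan (up_dice : List Int) (number : Int) : List Int → Int
  | [] => 0
  | k :: ks => if number = PySem.List.pyGetD up_dice k 0 then k else angryScan up_dice number ks

def angry (up_dice : List Int) (number : Int) : Int × Int :=
  let g := fun (i : Int) => PySem.List.pyGetD up_dice i 0   -- up_dice[i]; in range under Pre_
  let idx := angryScan up_dice number (PySem.List.pyRange 0 6 1)
  if idx = 0 then (max (max (max (g 1) (g 2)) (g 3)) (g 4), g 5)
  else if idx = 5 then (max (max (max (g 1) (g 2)) (g 3)) (g 4), g 0)
  else if idx = 1 then (max (max (max (g 0) (g 2)) (g 5)) (g 4), g 3)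
  else if idx = 3 then (max (max (max (g 0) (g 2)) (g 5)) (g 4), g 1)
  else if idx = 2 then (max (max (max (g 0) (g 1)) (g 5)) (g 3), g 4)
  else (max (max (max (g 0) (g 1)) (g 5)) (g 3), g 2)

-- ===== PORT B =====
-- B's identical top-face loop: 'for k in range(6): if number == up_dice[k]: top = k; break'
def altScan (up_dice : List Int) (number : Int) : List Int → Int
  | [] => 0
  | k :: ks => if number = PySem.List.pyGetD up_dice k 0 then k else altScan up_dice number ks

-- 'for k, v in <sorted pairs>: if k != top and k != bottom: return (v, up_dice[bottom])';
-- none = the (unreachable) fall-through where the loop returns nothing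
def altPick (up_dice : List Int) (top bottom : Int) : List (Int × Int) → Option (Int × Int)
  | [] => none
  | (k, v) :: t =>
      if k ≠ top ∧ k ≠ bottom then some (v, PySem.List.pyGetD up_dice bottom 0)
      else altPick up_dice top bottom t

def angry_alt (up_dice : List Int) (number : Int) : Int × Int :=
  let top := altScan up_dice number (PySem.List.pyRange 0 6 1)
  let bottom : Int :=
    if PySem.Int.mod top 5 = 0 then 5 - top else PySem.Int.mod (top + 1) 4 + 1
  let pairs : List (Int × Int) :=
    (PySem.List.pyRange 0 6 1).map (fun k => (k, PySem.List.pyGetD up_dice k 0))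
  -- Python's fall-through 'return None' is unreachable (4 of the 6 pairs pass the test)
  (altPick up_dice top bottom (PySem.List.sorted pairs (fun p => p.2) true)).getD (0, 0)

-- ===== PRECONDITION & SPEC =====
-- Pre_ excludes lists of fewer than six faces, on which the Python A raises IndexError.
def Pre_angry (up_dice : List Int) (number : Int) : Prop := 6 ≤ up_dice.length
instance (up_dice : List Int) (number : Int) : Decidable (Pre_angry up_dice number) := by unfold Pre_angry; infer_instance
def pvWitness_angry : List Int × Int := ([1, 2, 3, 4, 5, 6], 3)

def Spec_angry (up_dice : List Int) (number : Int) (out : Int × Int) : Prop := out = angry_alt up_dice number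
instance (up_dice : List Int) (number : Int) (out : Int × Int) : Decidable (Spec_angry up_dice number out) := by unfold Spec_angry; infer_instance

-- ===== CLAIM (what is proved, stated in full; the proofs are below) =====
def Claim_equal_angry : Prop := ∀ (up_dice : List Int) (number : Int), Dom_angry up_dice number → Pre_angry up_dice number → Spec_angry up_dice number (angry up_dice number)

-- ===== LEMMAS AND PROOFS =====

-- the first pair surviving the index test in a value-descending list carries the max value
-- among all surviving pairs
theorem altPick_spec (up_dice : List Int) (top bottom : Int) (s : List (Int × Int))
    (hsort : s.Pairwise (fun x y => y.2 ≤ x.2))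
    (hex : ∃ p ∈ s, p.1 ≠ top ∧ p.1 ≠ bottom) :
    ∃ k v, altPick up_dice top bottom s = some (v, PySem.List.pyGetD up_dice bottom 0) ∧
      (k, v) ∈ s ∧ k ≠ top ∧ k ≠ bottom ∧
      ∀ p ∈ s, p.1 ≠ top → p.1 ≠ bottom → p.2 ≤ v := by
  induction s with
  | nil => simp at hex
  | cons hd t ih =>
    obtain ⟨k0, v0⟩ := hd
    by_cases h : k0 ≠ top ∧ k0 ≠ bottom
    · refine ⟨k0, v0, by simp [altPick, h], by simp, h.1, h.2, ?_⟩
      intro p hp _ _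
      rcases List.mem_cons.mp hp with rfl | hp
      · exact le_refl _
      · exact (List.pairwise_cons.mp hsort).1 p hp
    · have hex' : ∃ p ∈ t, p.1 ≠ top ∧ p.1 ≠ bottom := by
        rcases hex with ⟨p, hp, hpp⟩
        rcases List.mem_cons.mp hp with rfl | hp
        · exact absurd hpp h
        · exact ⟨p, hp, hpp⟩
      obtain ⟨k, v, h1, h2, h3, h4, h5⟩ := ih (List.pairwise_cons.mp hsort).2 hex'
      refine ⟨k, v, by simpa [altPick, h] using h1, List.mem_cons_of_mem _ h2, h3, h4, ?_⟩
      intro p hp hpt hpb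
      rcases List.mem_cons.mp hp with rfl | hp
      · exact absurd ⟨hpt, hpb⟩ h
      · exact h5 p hp hpt hpb

set_option maxHeartbeats 1600000 in
set_option maxRecDepth 4096 in
theorem angry_eq_alt_of_six (a b c d e f : Int) (r : List Int) (number : Int) :
    angry (a :: b :: c :: d :: e :: f :: r) number = angry_alt (a :: b :: c :: d :: e :: f :: r) number := by
  have hr : PySem.List.pyRange 0 6 1 = [0, 1, 2, 3, 4, 5] := by decide
  have hscan : ∃ j, angryScan (a :: b :: c :: d :: e :: f :: r) number [0, 1, 2, 3, 4, 5] = j ∧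
      altScan (a :: b :: c :: d :: e :: f :: r) number [0, 1, 2, 3, 4, 5] = j ∧
      (j = 0 ∨ j = 1 ∨ j = 2 ∨ j = 3 ∨ j = 4 ∨ j = 5) := by
    by_cases h0 : number = a <;> by_cases h1 : number = b <;> by_cases h2 : number = c <;>
      by_cases h3 : number = d <;> by_cases h4 : number = e <;> by_cases h5 : number = f <;>
      simp_all [angryScan, altScan, PySem.List.pyGetD_ofNat']
  obtain ⟨j, hjA, hjB, hj⟩ := hscan
  have hpairsmem : ∀ p : Int × Int,
      p ∈ PySem.List.sorted ([(0, a), (1, b), (2, c), (3, d), (4, e), ((5 : Int), f)]) (fun p => p.2) true ↔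
      p ∈ [(0, a), (1, b), (2, c), (3, d), (4, e), ((5 : Int), f)] :=
    fun p => PySem.List.mem_sorted _ _ _ p
  have hsort := PySem.List.sorted_pairwise_rev
    (xs := [(0, a), (1, b), (2, c), (3, d), (4, e), ((5 : Int), f)]) (key := fun p => p.2)
  have hmap : ([(0 : Int), 1, 2, 3, 4, 5].map (fun k => (k, PySem.List.pyGetD (a :: b :: c :: d :: e :: f :: r) k 0)))
      = [(0, a), (1, b), (2, c), (3, d), (4, e), (5, f)] := by
    simp [PySem.List.pyGetD_ofNat', List.map]
  unfold angry angry_alt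
  rw [hr, hjA, hjB]
  simp only [hmap]
  rcases hj with h | h | h | h | h | h <;> subst h
  · have hbot : (if PySem.Int.mod (0 : Int) 5 = 0 then 5 - 0 else PySem.Int.mod (0 + 1) 4 + 1) = (5 : Int) := by decide
    obtain ⟨k, v, h1, h2, h3, h4, h5⟩ :=
      altPick_spec (a :: b :: c :: d :: e :: f :: r) 0 5 _ hsort
        ⟨(1, b), by simp, by norm_num, by norm_num⟩
    have hv := (hpairsmem (k, v)).mp h2
    have e1 := h5 (1, b) ((hpairsmem (1, b)).mpr (by simp)) (by norm_num) (by norm_num)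
    have e2 := h5 (2, c) ((hpairsmem (2, c)).mpr (by simp)) (by norm_num) (by norm_num)
    have e3 := h5 (3, d) ((hpairsmem (3, d)).mpr (by simp)) (by norm_num) (by norm_num)
    have e4 := h5 (4, e) ((hpairsmem (4, e)).mpr (by simp)) (by norm_num) (by norm_num)
    simp only [List.mem_cons, List.not_mem_nil, or_false, Prod.mk.injEq] at hv
    norm_num [hbot, PySem.List.pyGetD_ofNat', h1, Prod.ext_iff]
    rcases hv with ⟨hk, hv⟩ | ⟨hk, hv⟩ | ⟨hk, hv⟩ | ⟨hk, hv⟩ | ⟨hk, hv⟩ | ⟨hk, hv⟩ <;> omega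
  · have hbot : (if PySem.Int.mod (1 : Int) 5 = 0 then 5 - 1 else PySem.Int.mod (1 + 1) 4 + 1) = (3 : Int) := by decide
    obtain ⟨k, v, h1, h2, h3, h4, h5⟩ :=
      altPick_spec (a :: b :: c :: d :: e :: f :: r) 1 3 _ hsort
        ⟨(0, a), by simp, by norm_num, by norm_num⟩
    have hv := (hpairsmem (k, v)).mp h2
    have e1 := h5 (0, a) ((hpairsmem (0, a)).mpr (by simp)) (by norm_num) (by norm_num)
    have e2 := h5 (2, c) ((hpairsmem (2, c)).mpr (by simp)) (by norm_num) (by norm_num)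
    have e3 := h5 (5, f) ((hpairsmem (5, f)).mpr (by simp)) (by norm_num) (by norm_num)
    have e4 := h5 (4, e) ((hpairsmem (4, e)).mpr (by simp)) (by norm_num) (by norm_num)
    simp only [List.mem_cons, List.not_mem_nil, or_false, Prod.mk.injEq] at hv
    norm_num [hbot, PySem.List.pyGetD_ofNat', h1, Prod.ext_iff]
    rcases hv with ⟨hk, hv⟩ | ⟨hk, hv⟩ | ⟨hk, hv⟩ | ⟨hk, hv⟩ | ⟨hk, hv⟩ | ⟨hk, hv⟩ <;> omega
  · have hbot : (if PySem.Int.mod (2 : Int) 5 = 0 then 5 - 2 else PySem.Int.mod (2 + 1) 4 + 1) = (4 : Int) := by decide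
    obtain ⟨k, v, h1, h2, h3, h4, h5⟩ :=
      altPick_spec (a :: b :: c :: d :: e :: f :: r) 2 4 _ hsort
        ⟨(0, a), by simp, by norm_num, by norm_num⟩
    have hv := (hpairsmem (k, v)).mp h2
    have e1 := h5 (0, a) ((hpairsmem (0, a)).mpr (by simp)) (by norm_num) (by norm_num)
    have e2 := h5 (1, b) ((hpairsmem (1, b)).mpr (by simp)) (by norm_num) (by norm_num)
    have e3 := h5 (5, f) ((hpairsmem (5, f)).mpr (by simp)) (by norm_num) (by norm_num)
    have e4 := h5 (3, d) ((hpairsmem (3, d)).mpr (by simp)) (by norm_num) (by norm_num)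
    simp only [List.mem_cons, List.not_mem_nil, or_false, Prod.mk.injEq] at hv
    norm_num [hbot, PySem.List.pyGetD_ofNat', h1, Prod.ext_iff]
    rcases hv with ⟨hk, hv⟩ | ⟨hk, hv⟩ | ⟨hk, hv⟩ | ⟨hk, hv⟩ | ⟨hk, hv⟩ | ⟨hk, hv⟩ <;> omega
  · have hbot : (if PySem.Int.mod (3 : Int) 5 = 0 then 5 - 3 else PySem.Int.mod (3 + 1) 4 + 1) = (1 : Int) := by decide
    obtain ⟨k, v, h1, h2, h3, h4, h5⟩ :=
      altPick_spec (a :: b :: c :: d :: e :: f :: r) 3 1 _ hsort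
        ⟨(0, a), by simp, by norm_num, by norm_num⟩
    have hv := (hpairsmem (k, v)).mp h2
    have e1 := h5 (0, a) ((hpairsmem (0, a)).mpr (by simp)) (by norm_num) (by norm_num)
    have e2 := h5 (2, c) ((hpairsmem (2, c)).mpr (by simp)) (by norm_num) (by norm_num)
    have e3 := h5 (5, f) ((hpairsmem (5, f)).mpr (by simp)) (by norm_num) (by norm_num)
    have e4 := h5 (4, e) ((hpairsmem (4, e)).mpr (by simp)) (by norm_num) (by norm_num)
    simp only [List.mem_cons, List.not_mem_nil, or_false, Prod.mk.injEq] at hv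
    norm_num [hbot, PySem.List.pyGetD_ofNat', h1, Prod.ext_iff]
    rcases hv with ⟨hk, hv⟩ | ⟨hk, hv⟩ | ⟨hk, hv⟩ | ⟨hk, hv⟩ | ⟨hk, hv⟩ | ⟨hk, hv⟩ <;> omega
  · have hbot : (if PySem.Int.mod (4 : Int) 5 = 0 then 5 - 4 else PySem.Int.mod (4 + 1) 4 + 1) = (2 : Int) := by decide
    obtain ⟨k, v, h1, h2, h3, h4, h5⟩ :=
      altPick_spec (a :: b :: c :: d :: e :: f :: r) 4 2 _ hsort
        ⟨(0, a), by simp, by norm_num, by norm_num⟩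
    have hv := (hpairsmem (k, v)).mp h2
    have e1 := h5 (0, a) ((hpairsmem (0, a)).mpr (by simp)) (by norm_num) (by norm_num)
    have e2 := h5 (1, b) ((hpairsmem (1, b)).mpr (by simp)) (by norm_num) (by norm_num)
    have e3 := h5 (5, f) ((hpairsmem (5, f)).mpr (by simp)) (by norm_num) (by norm_num)
    have e4 := h5 (3, d) ((hpairsmem (3, d)).mpr (by simp)) (by norm_num) (by norm_num)
    simp only [List.mem_cons, List.not_mem_nil, or_false, Prod.mk.injEq] at hv
    norm_num [hbot, PySem.List.pyGetD_ofNat', h1, Prod.ext_iff]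
    rcases hv with ⟨hk, hv⟩ | ⟨hk, hv⟩ | ⟨hk, hv⟩ | ⟨hk, hv⟩ | ⟨hk, hv⟩ | ⟨hk, hv⟩ <;> omega
  · have hbot : (if PySem.Int.mod (5 : Int) 5 = 0 then 5 - 5 else PySem.Int.mod (5 + 1) 4 + 1) = (0 : Int) := by decide
    obtain ⟨k, v, h1, h2, h3, h4, h5⟩ :=
      altPick_spec (a :: b :: c :: d :: e :: f :: r) 5 0 _ hsort
        ⟨(1, b), by simp, by norm_num, by norm_num⟩
    have hv := (hpairsmem (k, v)).mp h2
    have e1 := h5 (1, b) ((hpairsmem (1, b)).mpr (by simp)) (by norm_num) (by norm_num)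
    have e2 := h5 (2, c) ((hpairsmem (2, c)).mpr (by simp)) (by norm_num) (by norm_num)
    have e3 := h5 (3, d) ((hpairsmem (3, d)).mpr (by simp)) (by norm_num) (by norm_num)
    have e4 := h5 (4, e) ((hpairsmem (4, e)).mpr (by simp)) (by norm_num) (by norm_num)
    simp only [List.mem_cons, List.not_mem_nil, or_false, Prod.mk.injEq] at hv
    norm_num [hbot, PySem.List.pyGetD_ofNat', h1, Prod.ext_iff]
    rcases hv with ⟨hk, hv⟩ | ⟨hk, hv⟩ | ⟨hk, hv⟩ | ⟨hk, hv⟩ | ⟨hk, hv⟩ | ⟨hk, hv⟩ <;> omega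

-- ===== VERDICT (by name: the statement is the Claim_ definition above) =====
theorem angry_spec : Claim_equal_angry := by
  intro up_dice number _ hpre
  unfold Spec_angry
  match up_dice, hpre with
  | a :: b :: c :: d :: e :: f :: r, _ => exact angry_eq_alt_of_six a b c d e f r number
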